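-- pv_equiv track=rewrite | github.com/bong-water-water-bong/meek | meek.py | _posture
-- ===== SOURCE A (Python) =====
-- SEVERITY_ORDER = {"CRITICAL": 0, "HIGH": 1, "MEDIUM": 2, "LOW": 3, "PASS": 4}
--
-- def _posture(results):
--     """Determine overall posture from a list of agent results."""
--     dominated = "PASS"
--     for r in results:
--         if SEVERITY_ORDER.get(r.get("severity", "PASS"), 4) < SEVERITY_ORDER.get(dominated, 4):
--             dominated = r["severity"]
--     if dominated == "CRITICAL":
--         return "COMPROMISED"
--     elif dominated in ("HIGH", "MEDIUM"):
--         return "WARNINGS"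
--     return "SECURE"
-- ===== SOURCE B (Python) =====
-- def _posture(results):
--     """Determine overall posture from a list of agent results."""
--     present = {r.get("severity", "PASS") for r in results}
--     if "CRITICAL" in present:
--         return "COMPROMISED"
--     if "HIGH" in present or "MEDIUM" in present:
--         return "WARNINGS"
--     return "SECURE"
-- ===== Notes on version B (the rewrite author's own statement) =====
-- stated objective: simpler
-- what changed: Replaces the running worst-severity minimum (rank comparisons against SEVERITY_ORDER plus a final classification of the tracked label) by a one-pass set of the severities present, deciding the posture by membership tests.
import Mathlib
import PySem

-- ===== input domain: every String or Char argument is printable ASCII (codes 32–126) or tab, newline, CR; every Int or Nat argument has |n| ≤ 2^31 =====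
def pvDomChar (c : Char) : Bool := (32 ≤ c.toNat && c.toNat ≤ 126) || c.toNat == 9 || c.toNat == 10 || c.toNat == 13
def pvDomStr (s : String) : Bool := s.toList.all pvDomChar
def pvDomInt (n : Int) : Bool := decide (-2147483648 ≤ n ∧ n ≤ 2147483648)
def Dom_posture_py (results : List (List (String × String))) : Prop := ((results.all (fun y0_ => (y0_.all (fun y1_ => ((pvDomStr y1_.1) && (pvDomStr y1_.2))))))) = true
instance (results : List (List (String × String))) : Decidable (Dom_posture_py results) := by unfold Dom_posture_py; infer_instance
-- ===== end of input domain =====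

-- B replaces A's running worst-severity minimum by a set of the severities present, decided by membership (objective: simpler).

-- ===== PORT A =====
-- SEVERITY_ORDER = {"CRITICAL": 0, "HIGH": 1, "MEDIUM": 2, "LOW": 3, "PASS": 4}
def SEVERITY_ORDER : PySem.Dict String Int :=
  PySem.Dict.mk [("CRITICAL", 0), ("HIGH", 1), ("MEDIUM", 2), ("LOW", 3), ("PASS", 4)]

-- r.get("severity", "PASS")
def sevOf (r : List (String × String)) : String := PySem.Dict.getD ⟨r⟩ "severity" "PASS"

-- SEVERITY_ORDER.get(s, 4)
def ordv (s : String) : Int := PySem.Dict.getD SEVERITY_ORDER s 4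

-- loop body: if SEVERITY_ORDER.get(r.get("severity","PASS"),4) < SEVERITY_ORDER.get(dominated,4): dominated = r["severity"]
-- (when the condition holds, r's rank is < 4, so "severity" is a key of r and r["severity"] equals sevOf r)
def postureStep (dominated : String) (r : List (String × String)) : String :=
  if ordv (sevOf r) < ordv dominated then sevOf r else dominated

def posture_py (results : List (List (String × String))) : String :=
  let dominated := results.foldl postureStep "PASS"
  if dominated == "CRITICAL" then "COMPROMISED"
  else if dominated == "HIGH" || dominated == "MEDIUM" then "WARNINGS"
  else "SECURE"

-- ===== PORT B =====
def posture_py_alt (results : List (List (String × String))) : String :=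
  let present : PySem.Set String := PySem.Set.ofList (results.map sevOf)
  if PySem.Set.contains present "CRITICAL" then "COMPROMISED"
  else if PySem.Set.contains present "HIGH" || PySem.Set.contains present "MEDIUM" then "WARNINGS"
  else "SECURE"

-- ===== PRECONDITION & SPEC =====
def Spec_posture_py (results : List (List (String × String))) (out : String) : Prop := out = posture_py_alt results
instance (results : List (List (String × String))) (out : String) : Decidable (Spec_posture_py results out) := by unfold Spec_posture_py; infer_instance

-- ===== CLAIM (what is proved, stated in full; the proofs are below) =====
def Claim_equal_posture_py : Prop := ∀ (results : List (List (String × String))), Dom_posture_py results → Spec_posture_py results (posture_py results)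

-- ===== LEMMAS AND PROOFS =====

-- A's final classification of the tracked label
def cls (d : String) : String :=
  if d == "CRITICAL" then "COMPROMISED"
  else if d == "HIGH" || d == "MEDIUM" then "WARNINGS"
  else "SECURE"

-- B's classification, generalised with a pending accumulator label d
def clsB (d : String) (S : List String) : String :=
  if d == "CRITICAL" || S.contains "CRITICAL" then "COMPROMISED"
  else if d == "HIGH" || d == "MEDIUM" || S.contains "HIGH" || S.contains "MEDIUM" then "WARNINGS"
  else "SECURE"

theorem ordv_eq (s : String) :
    ordv s = if s = "CRITICAL" then 0 else if s = "HIGH" then 1 else if s = "MEDIUM" then 2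
             else if s = "LOW" then 3 else 4 := by
  simp only [ordv, SEVERITY_ORDER, PySem.Dict.getD_eq_get?_getD, PySem.Dict.get?_mk_cons, beq_iff_eq]
  by_cases h1 : s = "CRITICAL" <;> by_cases h2 : s = "HIGH" <;> by_cases h3 : s = "MEDIUM" <;>
    by_cases h4 : s = "LOW" <;> by_cases h5 : s = "PASS" <;>
    simp only [h1, h2, h3, h4, h5, if_true, if_false, eq_comm] <;> first | rfl | simp_all

theorem sev_cases (s : String) :
    s = "CRITICAL" ∨ s = "HIGH" ∨ s = "MEDIUM" ∨ s = "LOW" ∨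
      (ordv s = 4 ∧ s ≠ "CRITICAL" ∧ s ≠ "HIGH" ∧ s ≠ "MEDIUM" ∧ s ≠ "LOW") := by
  by_cases h1 : s = "CRITICAL" <;> by_cases h2 : s = "HIGH" <;> by_cases h3 : s = "MEDIUM" <;>
    by_cases h4 : s = "LOW" <;> simp_all [ordv_eq]

theorem step_mem (d : String) (r : List (String × String))
    (hd : d = "CRITICAL" ∨ d = "HIGH" ∨ d = "MEDIUM" ∨ d = "LOW" ∨ d = "PASS") :
    postureStep d r = "CRITICAL" ∨ postureStep d r = "HIGH" ∨ postureStep d r = "MEDIUM" ∨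
      postureStep d r = "LOW" ∨ postureStep d r = "PASS" := by
  unfold postureStep
  rcases sev_cases (sevOf r) with h | h | h | h | ⟨h, _⟩ <;> rcases hd with h' | h' | h' | h' | h' <;>
    rw [h'] <;> simp [h, ordv_eq]

theorem step_clsB (d s : String) (S : List String)
    (hd : d = "CRITICAL" ∨ d = "HIGH" ∨ d = "MEDIUM" ∨ d = "LOW" ∨ d = "PASS") :
    clsB (if ordv s < ordv d then s else d) S = clsB d (s :: S) := by
  rcases sev_cases s with h | h | h | h | ⟨h, hn1, hn2, hn3, _⟩ <;>
    rcases hd with h' | h' | h' | h' | h' <;> subst h' <;>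
    simp [h, ordv_eq, clsB] <;>
    simp [Ne.symm hn1, Ne.symm hn2, Ne.symm hn3]

theorem fold_classify (results : List (List (String × String))) :
    ∀ d : String, d = "CRITICAL" ∨ d = "HIGH" ∨ d = "MEDIUM" ∨ d = "LOW" ∨ d = "PASS" →
      cls (results.foldl postureStep d) = clsB d (results.map sevOf) := by
  induction results with
  | nil => intro d hd; rcases hd with h | h | h | h | h <;> subst h <;> decide
  | cons r rs ih =>
    intro d hd
    rw [List.foldl_cons, List.map_cons, ih _ (step_mem d r hd)]
    exact step_clsB d (sevOf r) (rs.map sevOf) hd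

theorem alt_eq_clsB (results : List (List (String × String))) :
    posture_py_alt results = clsB "PASS" (results.map sevOf) := by
  have hc : ∀ x : String,
      PySem.Set.contains (PySem.Set.ofList (results.map sevOf)) x = (results.map sevOf).contains x := by
    intro x
    rw [Bool.eq_iff_iff, PySem.Set.contains_iff, List.contains_iff_mem, PySem.Set.mem_ofList]
  simp only [posture_py_alt, hc, clsB]
  simp

-- ===== VERDICT (by name: the statement is the Claim_ definition above) =====
theorem posture_py_spec : Claim_equal_posture_py := by
  intro results _
  unfold Spec_posture_py
  have h := fold_classify results "PASS" (by tauto)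
  have hA : posture_py results = cls (results.foldl postureStep "PASS") := rfl
  rw [hA, h, alt_eq_clsB]
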